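-- pv_equiv track=rewrite | github.com/rafiimanggala/MiroFish | backend/app/services/report_generator.py | _format_timeline_summary
-- ===== SOURCE A (Python) =====
-- from typing import Dict, Any, List, Optional, Callable
--
-- def _format_timeline_summary(actions: List[Dict]) -> str:
--     """Format actions by round."""
--     rounds: Dict[int, int] = {}
--     for act in actions:
--         rn = act.get("round_num", 0)
--         rounds[rn] = rounds.get(rn, 0) + 1
--
--     lines = ["## Timeline Summary"]
--     for rn in sorted(rounds.keys()):
--         lines.append(f"- Round {rn}: {rounds[rn]} actions")
--
--     return "\n".join(lines)
-- ===== SOURCE B (Python) =====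
-- def _format_timeline_summary(actions):
--     """Format actions by round: sort the keys once, then one pass over contiguous runs."""
--     keys = sorted(a.get("round_num", 0) for a in actions)
--     lines = ["## Timeline Summary"]
--     i, n = 0, len(keys)
--     while i < n:
--         j = i + 1
--         while j < n and keys[j] == keys[i]:
--             j += 1
--         lines.append(f"- Round {keys[i]}: {j - i} actions")
--         i = j
--     return "\n".join(lines)
-- ===== Notes on version B (the rewrite author's own statement) =====
-- stated objective: alternative
-- what changed: Replaces the frequency-dict + sorted-distinct-keys structure with sorting the extracted round keys once and emitting one line per contiguous run in a single two-pointer pass.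
import Mathlib
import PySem

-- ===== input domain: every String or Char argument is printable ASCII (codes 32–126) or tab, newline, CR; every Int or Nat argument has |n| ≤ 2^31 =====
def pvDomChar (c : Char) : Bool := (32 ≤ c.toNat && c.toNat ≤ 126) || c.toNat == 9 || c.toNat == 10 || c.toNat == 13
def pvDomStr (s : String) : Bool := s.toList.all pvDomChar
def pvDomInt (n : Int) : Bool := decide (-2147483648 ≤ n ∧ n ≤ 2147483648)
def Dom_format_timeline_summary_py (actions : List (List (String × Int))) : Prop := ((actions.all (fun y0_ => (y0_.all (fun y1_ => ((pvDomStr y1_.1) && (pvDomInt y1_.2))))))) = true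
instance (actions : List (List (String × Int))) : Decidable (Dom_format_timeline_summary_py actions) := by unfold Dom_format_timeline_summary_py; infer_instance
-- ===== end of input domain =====

-- B replaces A's frequency dict + sorted-keys pass by sorting the extracted keys once and
-- emitting one line per contiguous run in a single pass (alternative decomposition, same cost).

-- ===== PORT A =====
-- literal port of A: build a frequency dict over act.get("round_num", 0), then append one
-- line per sorted key, then "\n".join.
def format_timeline_summary_py (actions : List (List (String × Int))) : String :=
  let rounds := actions.foldl
    (fun d act =>
      let rn := (PySem.Dict.mk act).getD "round_num" 0
      d.insert rn (d.getD rn 0 + 1))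
    PySem.Dict.empty
  let lines := (PySem.List.sorted rounds.keys (fun x => x) false).foldl
    (fun ls rn =>
      ls ++ ["- Round " ++ PySem.Int.toStr rn ++ ": " ++ PySem.Int.toStr (rounds.getD rn 0) ++ " actions"])
    ["## Timeline Summary"]
  PySem.Str.join "\n" lines

-- ===== PORT B =====
-- B's inner while loop advances j over the contiguous run equal to keys[i] (takeWhile),
-- the outer loop resumes at i = j (dropWhile); one line per run with count j - i.
def pvRunLines : List Int → List String
  | [] => []
  | k :: rest =>
    ("- Round " ++ PySem.Int.toStr k ++ ": "
        ++ PySem.Int.toStr (((1 + (rest.takeWhile (fun x => x == k)).length : Nat) : Int)) ++ " actions")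
      :: pvRunLines (rest.dropWhile (fun x => x == k))
termination_by l => l.length
decreasing_by
  simp only [List.length_cons]
  exact Nat.lt_succ_of_le (List.length_dropWhile_le _ _)

def format_timeline_summary_py_alt (actions : List (List (String × Int))) : String :=
  let keys := PySem.List.sorted (actions.map (fun a => (PySem.Dict.mk a).getD "round_num" 0)) (fun x => x) false
  PySem.Str.join "\n" ("## Timeline Summary" :: pvRunLines keys)

-- ===== PRECONDITION & SPEC =====
def Spec_format_timeline_summary_py (actions : List (List (String × Int))) (out : String) : Prop := out = format_timeline_summary_py_alt actions
instance (actions : List (List (String × Int))) (out : String) : Decidable (Spec_format_timeline_summary_py actions out) := by unfold Spec_format_timeline_summary_py; infer_instance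

-- ===== CLAIM (what is proved, stated in full; the proofs are below) =====
def Claim_equal_format_timeline_summary_py : Prop := ∀ (actions : List (List (String × Int))), Dom_format_timeline_summary_py actions → Spec_format_timeline_summary_py actions (format_timeline_summary_py actions)

-- ===== LEMMAS AND PROOFS =====

-- One sorted-run step: the contiguous run structure of the sorted key list matches the
-- sorted distinct keys with their multiplicities.
lemma pvRunLines_sorted_aux : ∀ (n : Nat) (ks : List Int), ks.length ≤ n →
    pvRunLines (PySem.List.sorted ks (fun x => x) false)
      = (PySem.List.sorted (PySem.Set.ofList ks) (fun x => x) false).map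
          (fun k => "- Round " ++ PySem.Int.toStr k ++ ": "
              ++ PySem.Int.toStr ((List.count k ks : Int)) ++ " actions") := by
  intro n
  induction n with
  | zero =>
    intro ks h
    have hks : ks = [] := List.eq_nil_of_length_eq_zero (Nat.le_zero.mp h)
    subst hks
    show pvRunLines [] = List.map _ []
    simp only [pvRunLines, List.map_nil]
  | succ n ih =>
    intro ks h
    cases hs : PySem.List.sorted ks (fun x => x) false with
    | nil =>
      have hks : ks = [] := (PySem.List.sorted_eq_nil_iff ks (fun x => x) false).mp hs
      subst hks
      show pvRunLines [] = List.map _ []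
      simp only [pvRunLines, List.map_nil]
    | cons m t =>
      have hperm : (m :: t).Perm ks := hs ▸ PySem.List.sorted_perm ks (fun x => x) false
      have hpw : (m :: t).Pairwise (fun a b => a ≤ b) := hs ▸ PySem.List.sorted_pairwise ks (fun x => x)
      have hmin : ∀ y ∈ ks, m ≤ y := PySem.List.key_head_sorted_le ks (fun x => x) hs
      have hmem : m ∈ ks := hperm.subset (by simp)
      have hmle : ∀ x ∈ t, m ≤ x := (List.pairwise_cons.mp hpw).1
      -- the leading run and the remainder
      have ht1 : ∀ x ∈ t.takeWhile (fun x => x == m), x = m := by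
        intro x hx
        have hx' : (x == m) = true := List.mem_takeWhile_imp (p := fun x => x == m) (l := t) hx
        exact eq_of_beq hx'
      have hpt : (t.dropWhile (fun x => x == m)).Pairwise (fun a b => a ≤ b) :=
        List.Pairwise.sublist ((List.dropWhile_sublist _).trans (List.sublist_cons_self m t)) hpw
      have ht2 : ∀ x ∈ t.dropWhile (fun x => x == m), m < x := by
        cases e : t.dropWhile (fun x => x == m) with
        | nil => intro x hx; exact absurd hx (by simp)
        | cons b t2' =>
          have hbne : (b == m) = false := by
            have hne : t.dropWhile (fun x => x == m) ≠ [] := by simp [e]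
            have hhead := List.head_dropWhile_not (fun x => x == m) hne
            have h1 : (t.dropWhile (fun x => x == m)).head? = some ((t.dropWhile (fun x => x == m)).head hne) :=
              List.head?_eq_some_head hne
            have h2 : some b = some ((t.dropWhile (fun x => x == m)).head hne) := by
              rw [← h1, e]
              rfl
            have hb : (t.dropWhile (fun x => x == m)).head hne = b := (Option.some.inj h2).symm
            rw [hb] at hhead
            exact hhead
          have hbm : m < b := by
            have hbmem : b ∈ t.dropWhile (fun x => x == m) := by rw [e]; simp
            have : m ≤ b := hmle b ((List.dropWhile_sublist _).subset hbmem)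
            rcases lt_or_eq_of_le this with h' | h'
            · exact h'
            · simp [← h'] at hbne
          intro x hx
          rcases List.mem_cons.mp hx with rfl | hx'
          · exact hbm
          · have hple : b ≤ x := by
              have := (e ▸ hpt)
              exact (List.pairwise_cons.mp this).1 x hx'
            exact lt_of_lt_of_le hbm hple
      have hnom : m ∉ t.dropWhile (fun x => x == m) := fun hx => lt_irrefl m (ht2 m hx)
      -- count of the head key
      have hcount : List.count m ks = 1 + (t.takeWhile (fun x => x == m)).length := by
        have h1 : List.count m ks = List.count m (m :: t) := (hperm.count_eq m).symm
        have h2 : List.count m t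
            = List.count m (t.takeWhile (fun x => x == m)) + List.count m (t.dropWhile (fun x => x == m)) := by
          conv_lhs => rw [← List.takeWhile_append_dropWhile (p := fun x => x == m) (l := t)]
          exact List.count_append ..
        have h3 : List.count m (t.takeWhile (fun x => x == m)) = (t.takeWhile (fun x => x == m)).length :=
          List.count_eq_length.mpr (fun b hb => (ht1 b hb).symm)
        have h4 : List.count m (t.dropWhile (fun x => x == m)) = 0 := List.count_eq_zero.mpr hnom
        rw [h1, List.count_cons_self, h2, h3, h4]
        omega
      -- the remainder is the sorted version of ks with all copies of m removed
      have hfilt : (m :: t).filter (fun x => !(x == m)) = t.dropWhile (fun x => x == m) := by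
        have e1 : (t.takeWhile (fun x => x == m)).filter (fun x => !(x == m)) = [] := by
          apply List.filter_eq_nil_iff.mpr
          intro a ha
          simp [ht1 a ha]
        have e2 : (t.dropWhile (fun x => x == m)).filter (fun x => !(x == m))
            = t.dropWhile (fun x => x == m) := by
          apply List.filter_eq_self.mpr
          intro a ha
          have hne' : (a == m) = false := beq_eq_false_iff_ne.mpr (ne_of_gt (ht2 a ha))
          simp [hne']
        calc (m :: t).filter (fun x => !(x == m))
            = t.filter (fun x => !(x == m)) := by simp
          _ = ((t.takeWhile (fun x => x == m)) ++ (t.dropWhile (fun x => x == m))).filter (fun x => !(x == m)) := by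
                rw [List.takeWhile_append_dropWhile]
          _ = t.dropWhile (fun x => x == m) := by rw [List.filter_append, e1, e2]; simp
      have hpermt2 : (t.dropWhile (fun x => x == m)).Perm (ks.filter (fun x => !(x == m))) :=
        hfilt ▸ hperm.filter (fun x => !(x == m))
      have hst2 : PySem.List.sorted (ks.filter (fun x => !(x == m))) (fun x => x) false
          = t.dropWhile (fun x => x == m) :=
        PySem.List.sorted_id_eq_of_perm_of_pairwise _ _ hpermt2 hpt
      -- length bound for the induction hypothesis
      have hlen : (ks.filter (fun x => !(x == m))).length < ks.length :=
        List.length_filter_lt_length_iff_exists.mpr ⟨m, hmem, by simp⟩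
      have hlen' : (ks.filter (fun x => !(x == m))).length ≤ n := by
        have : 1 ≤ ks.length := by
          have := hperm.length_eq
          simp at this
          omega
        omega
      have hih := ih (ks.filter (fun x => !(x == m))) hlen'
      -- sorted distinct keys of ks = m followed by sorted distinct keys of the filtered list
      have hkey : PySem.List.sorted (PySem.Set.ofList ks) (fun x => x) false
          = m :: PySem.List.sorted (PySem.Set.ofList (ks.filter (fun x => !(x == m)))) (fun x => x) false := by
        apply PySem.List.sorted_eq_of_perm_of_pairwise_lt
        · -- permutation via nodup + membership
          have hnd1 : (m :: PySem.List.sorted (PySem.Set.ofList (ks.filter (fun x => !(x == m)))) (fun x => x) false).Nodup := by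
            apply List.nodup_cons.mpr
            constructor
            · intro hmx
              have := (PySem.List.mem_sorted _ _ _ m).mp hmx
              have := (PySem.Set.mem_ofList _ m).mp this
              have := List.mem_filter.mp this
              simp at this
            · exact ((PySem.List.sorted_perm _ _ _).nodup_iff).mpr (PySem.Set.nodup_ofList _)
          apply (List.perm_ext_iff_of_nodup hnd1 (PySem.Set.nodup_ofList ks)).mpr
          intro a
          simp only [List.mem_cons, PySem.List.mem_sorted, PySem.Set.mem_ofList, List.mem_filter]
          constructor
          · rintro (rfl | ⟨ha, _⟩)
            · exact hmem
            · exact ha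
          · intro ha
            by_cases hane : a = m
            · exact Or.inl hane
            · exact Or.inr ⟨ha, by simp [hane]⟩
        · -- strictly increasing
          apply List.pairwise_cons.mpr
          refine ⟨?_, PySem.List.sorted_ofList_pairwise_lt _⟩
          intro x hx
          have hx' := (PySem.Set.mem_ofList _ x).mp ((PySem.List.mem_sorted _ _ _ x).mp hx)
          have ⟨hxks, hxne⟩ := List.mem_filter.mp hx'
          have : m ≤ x := hmin x hxks
          rcases lt_or_eq_of_le this with h' | h'
          · exact h'
          · simp [← h'] at hxne
      -- counts agree between ks and the filtered list on the remaining keys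
      have hcnt' : ∀ x ∈ PySem.List.sorted (PySem.Set.ofList (ks.filter (fun x => !(x == m)))) (fun x => x) false,
          List.count x (ks.filter (fun x => !(x == m))) = List.count x ks := by
        intro x hx
        have hx' := (PySem.Set.mem_ofList _ x).mp ((PySem.List.mem_sorted _ _ _ x).mp hx)
        have hxne := (List.mem_filter.mp hx').2
        exact List.count_filter hxne
      -- assemble
      rw [hkey]
      simp only [List.map_cons]
      rw [show pvRunLines (m :: t)
            = ("- Round " ++ PySem.Int.toStr m ++ ": "
                ++ PySem.Int.toStr (((1 + (t.takeWhile (fun x => x == m)).length : Nat) : Int)) ++ " actions")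
              :: pvRunLines (t.dropWhile (fun x => x == m)) from by rw [pvRunLines]]
      rw [← hst2, hih]
      congr 1
      · have : ((1 + (t.takeWhile (fun x => x == m)).length : Nat) : Int) = (List.count m ks : Int) := by
          rw [hcount]
        rw [this]
      · apply List.map_congr_left
        intro x hx
        rw [hcnt' x hx]

lemma pvRunLines_sorted (ks : List Int) :
    pvRunLines (PySem.List.sorted ks (fun x => x) false)
      = (PySem.List.sorted (PySem.Set.ofList ks) (fun x => x) false).map
          (fun k => "- Round " ++ PySem.Int.toStr k ++ ": "
              ++ PySem.Int.toStr ((List.count k ks : Int)) ++ " actions") :=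
  pvRunLines_sorted_aux ks.length ks (Nat.le_refl _)

-- ===== VERDICT (by name: the statement is the Claim_ definition above) =====
theorem format_timeline_summary_py_spec : Claim_equal_format_timeline_summary_py := by
  intro actions _
  unfold Spec_format_timeline_summary_py
  simp only [format_timeline_summary_py, format_timeline_summary_py_alt]
  have h1 : actions.foldl
      (fun d act => d.insert ((PySem.Dict.mk act).getD "round_num" 0)
        (d.getD ((PySem.Dict.mk act).getD "round_num" 0) 0 + 1))
      PySem.Dict.empty
      = PySem.Dict.counter (actions.map (fun a => (PySem.Dict.mk a).getD "round_num" 0)) := by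
    rw [← PySem.Dict.foldl_insert_getD_add_one_eq_counter, List.foldl_map]
  rw [h1, PySem.Dict.keys_counter]
  simp only [PySem.List.foldl_append_singleton_eq_map, PySem.Dict.getD_counter]
  rw [pvRunLines_sorted]
  rfl
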